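-- pv_equiv track=rewrite | github.com/Lehm12/Atcoder | ABC191/C.py | solution
-- ===== SOURCE A (Python) =====
-- def solution(A):
--     past_sign = 0  # 0:不明 1:＋　-1:-
--     count = 0
--     for i in range(len(A) - 1):
--         # 前の木の高さとの差をとって符号を決定する
--         if (A[i] - A[i + 1] < 0):
--             sign = -1
--         else:
--             sign = 1
--
--         # 前回の符号と同じか判定
--         if past_sign == sign:
--             count += 1
--             sign = sign * -1
--
--         past_sign = sign
--
--     return count
-- ===== SOURCE B (Python) =====
-- def solution(A):
--     n = len(A)
--     if n < 2:
--         return 0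
--     s0 = -1 if A[0] < A[1] else 1
--     count = 0
--     for i in range(1, n - 1):
--         si = -1 if A[i] < A[i + 1] else 1
--         expected = s0 if i % 2 == 1 else -s0
--         if si == expected:
--             count += 1
--     return count
-- ===== Notes on version B (the rewrite author's own statement) =====
-- stated objective: alternative
-- what changed: B replaces A's mutable past_sign/flip state machine with a stateless parity prediction: after the first comparison the matched-against sign is provably s0*(-1)^(i-1), so B just counts indices i>=1 whose sign equals the parity-predicted one.
import Mathlib
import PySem

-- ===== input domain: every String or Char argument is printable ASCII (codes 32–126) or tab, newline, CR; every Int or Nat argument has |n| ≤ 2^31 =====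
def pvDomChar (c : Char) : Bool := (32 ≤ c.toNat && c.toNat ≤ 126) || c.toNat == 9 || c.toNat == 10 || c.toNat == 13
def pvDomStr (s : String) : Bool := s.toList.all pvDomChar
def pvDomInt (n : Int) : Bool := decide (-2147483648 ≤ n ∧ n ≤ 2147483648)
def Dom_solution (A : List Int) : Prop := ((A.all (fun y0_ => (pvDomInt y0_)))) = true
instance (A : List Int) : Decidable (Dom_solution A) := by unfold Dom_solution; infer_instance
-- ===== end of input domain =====

-- B drops A's past_sign/flip state machine for a stateless parity prediction of the expected sign (objective: alternative decomposition).

-- ===== PORT A =====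
-- literal port of A: fold over range(len(A)-1) carrying (past_sign, count);
-- indices are always in range, so pyGetD's default 0 is never used
def solution (A : List Int) : Int :=
  ((PySem.List.pyRange 0 ((A.length : Int) - 1) 1).foldl
    (fun (st : Int × Int) i =>
      let sign : Int := if PySem.List.pyGetD A i 0 - PySem.List.pyGetD A (i + 1) 0 < 0 then -1 else 1
      if st.1 = sign then (-sign, st.2 + 1) else (sign, st.2))
    (0, 0)).2

-- ===== PORT B =====
-- literal port of Source B; `i % 2` has a positive divisor, where Lean's Int.% agrees with Python's %
def solution_alt (A : List Int) : Int :=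
  if A.length < 2 then 0
  else
    let s0 : Int := if PySem.List.pyGetD A 0 0 < PySem.List.pyGetD A 1 0 then -1 else 1
    (PySem.List.pyRange 1 ((A.length : Int) - 1) 1).foldl
      (fun (count : Int) i =>
        let si : Int := if PySem.List.pyGetD A i 0 < PySem.List.pyGetD A (i + 1) 0 then -1 else 1
        let expected : Int := if i % 2 = 1 then s0 else -s0
        if si = expected then count + 1 else count)
      0

-- ===== PRECONDITION & SPEC =====
def Spec_solution (A : List Int) (out : Int) : Prop := out = solution_alt A
instance (A : List Int) (out : Int) : Decidable (Spec_solution A out) := by unfold Spec_solution; infer_instance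

-- ===== CLAIM (what is proved, stated in full; the proofs are below) =====
def Claim_equal_solution : Prop := ∀ (A : List Int), Dom_solution A → Spec_solution A (solution A)

-- ===== LEMMAS AND PROOFS =====

-- proof-side names for the two loop bodies (definitionally equal to the lambdas in the ports)
def pvStepA (A : List Int) (st : Int × Int) (i : Int) : Int × Int :=
  let sign : Int := if PySem.List.pyGetD A i 0 - PySem.List.pyGetD A (i + 1) 0 < 0 then -1 else 1
  if st.1 = sign then (-sign, st.2 + 1) else (sign, st.2)

def pvStepB (A : List Int) (s0 : Int) (count : Int) (i : Int) : Int :=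
  let si : Int := if PySem.List.pyGetD A i 0 < PySem.List.pyGetD A (i + 1) 0 then -1 else 1
  let expected : Int := if i % 2 = 1 then s0 else -s0
  if si = expected then count + 1 else count

-- the sign of comparison i, and the parity-predicted past_sign
def pvSg (A : List Int) (i : Int) : Int :=
  if PySem.List.pyGetD A i 0 < PySem.List.pyGetD A (i + 1) 0 then -1 else 1

def pvExp (s0 i : Int) : Int := if i % 2 = 1 then s0 else -s0

lemma pvSg_cases (A : List Int) (i : Int) : pvSg A i = 1 ∨ pvSg A i = -1 := by
  unfold pvSg; split <;> simp

lemma pvStepA_eq (A : List Int) (st : Int × Int) (i : Int) :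
    pvStepA A st i = if st.1 = pvSg A i then (-(pvSg A i), st.2 + 1) else (pvSg A i, st.2) := by
  unfold pvStepA pvSg
  have h : (PySem.List.pyGetD A i 0 - PySem.List.pyGetD A (i + 1) 0 < 0) ↔
      (PySem.List.pyGetD A i 0 < PySem.List.pyGetD A (i + 1) 0) := by omega
  simp only [h]

lemma pvExp_succ (s0 i : Int) : pvExp s0 (i + 1) = -(pvExp s0 i) := by
  unfold pvExp
  by_cases h : i % 2 = 1
  · have h' : (i + 1) % 2 ≠ 1 := by omega
    simp [h, h']
  · have h' : (i + 1) % 2 = 1 := by omega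
    simp [h, h']

-- main invariant: from state (pvExp s0 a, c) A's loop over [a, m) counts exactly what B's does
lemma pv_loop_eq (A : List Int) (s0 : Int) (hs0 : s0 = 1 ∨ s0 = -1) (m : Int) :
    ∀ k a c, (m - a).toNat = k →
      ((PySem.List.pyRange a m 1).foldl (pvStepA A) (pvExp s0 a, c)).2
        = (PySem.List.pyRange a m 1).foldl (pvStepB A s0) c := by
  intro k
  induction k with
  | zero =>
    intro a c hk
    have hma : m ≤ a := by omega
    rw [PySem.List.pyRange_one_eq_nil hma]
    simp
  | succ k ih =>
    intro a c hk
    have ham : a < m := by omega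
    rw [PySem.List.pyRange_one_cons ham]
    simp only [List.foldl_cons]
    have hstep : pvStepA A (pvExp s0 a, c) a =
        (pvExp s0 (a + 1), pvStepB A s0 c a) := by
      rw [pvStepA_eq, pvExp_succ]
      unfold pvStepB pvExp
      rcases pvSg_cases A a with hsg | hsg <;>
        rcases hs0 with h0 | h0 <;>
        · show _ = (_, if pvSg A a = (if a % 2 = 1 then s0 else -s0) then c + 1 else c)
          by_cases hp : a % 2 = 1 <;> simp [hsg, h0, hp]
    rw [hstep, ih (a + 1) (pvStepB A s0 c a) (by omega)]

lemma pv_solution_eq (A : List Int) :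
    solution A = ((PySem.List.pyRange 0 ((A.length : Int) - 1) 1).foldl (pvStepA A) (0, 0)).2 := rfl

lemma pv_solution_alt_eq (A : List Int) (h : ¬ A.length < 2) :
    solution_alt A =
      (PySem.List.pyRange 1 ((A.length : Int) - 1) 1).foldl
        (pvStepB A (if PySem.List.pyGetD A 0 0 < PySem.List.pyGetD A 1 0 then -1 else 1)) 0 := by
  unfold solution_alt
  rw [if_neg h]
  rfl

-- ===== VERDICT (by name: the statement is the Claim_ definition above) =====
theorem solution_spec : Claim_equal_solution := by
  intro A _
  unfold Spec_solution
  by_cases hlen : A.length < 2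
  · -- both loops are empty: len(A) - 1 ≤ 1 gives range(0, ≤1) of length ≤ 1, but len < 2 gives len - 1 ≤ 0
    rw [pv_solution_eq]
    unfold solution_alt
    rw [if_pos hlen]
    rw [PySem.List.pyRange_one_eq_nil (by omega : ((A.length : Int) - 1) ≤ 0)]
    simp
  · set s0 : Int := if PySem.List.pyGetD A 0 0 < PySem.List.pyGetD A 1 0 then -1 else 1 with hs0def
    have hs0 : s0 = 1 ∨ s0 = -1 := by rw [hs0def]; split <;> simp
    have hm : (0 : Int) < (A.length : Int) - 1 := by omega
    rw [pv_solution_eq, pv_solution_alt_eq A hlen, PySem.List.pyRange_one_cons hm]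
    simp only [List.foldl_cons]
    have hfirst : pvStepA A (0, 0) 0 = (pvExp s0 1, 0) := by
      rw [pvStepA_eq]
      have hsg : pvSg A 0 = s0 := by
        unfold pvSg; rw [hs0def]; norm_num
      have hne : (0 : Int) ≠ pvSg A 0 := by
        rcases pvSg_cases A 0 with h | h <;> rw [h] <;> norm_num
      rw [if_neg hne, hsg]
      unfold pvExp
      norm_num
    rw [hfirst]
    rw [show ((0 : Int) + 1) = 1 by norm_num]
    rw [pv_loop_eq A s0 hs0 ((A.length : Int) - 1) ((A.length : Int) - 2).toNat 1 0 (by omega)]
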